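-- pv_equiv track=rewrite | github.com/daredevilq/algorithms-and-data-structures | zad2/zad2.py | snow
-- ===== SOURCE A (Python) =====
-- def left(i):
--     return 2*i+1
--
-- def right(i):
--     return 2*i+2
--
-- def parent(i):
--     return (i-1)//2
--
-- def heapyfiy(arr,n,i):
--     l=left(i)
--     r=right(i)
--
--     max_ind=i
--
--     if l<n and arr[l]>arr[max_ind]:
--         max_ind=l
--     if r<n and arr[r]>arr[max_ind]:
--         max_ind=r
--
--
--     if max_ind!=i:
--         arr[i],arr[max_ind]=arr[max_ind],arr[i]
--         heapyfiy(arr,n,max_ind)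
--
-- def build_heap(arr):
--     n=len(arr)
--     for i in range(parent(n-1),-1,-1):
--         heapyfiy(arr,n,i)
--
-- def heap_sort(arr,max_val):
--     stop=0
--     n=len(arr)
--     if max_val<n:
--         stop=n-max_val-1
--
--     build_heap(arr)
--     for i in range(n-1,stop,-1):
--         arr[0],arr[i]=arr[i],arr[0]
--         heapyfiy(arr,i,0)
--
-- def snow(S):
--
--     max_value=0
--     for i in range(1,len(S)):
--         if S[i]>max_value:
--             max_value=S[i]
--
--     heap_sort(S,max_value)
--
--     counter=0
--     days=0
--
--     for i in range(len(S)-1,-1,-1):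
--         if S[i]-days<=0:
--             return counter
--         counter+=S[i]-days
--         days+=1
--     return counter
-- ===== SOURCE B (Python) =====
-- def snow(S):
--     n = len(S)
--     buckets = [0] * n
--     total = 0
--     c = 0
--     for x in S:
--         if x >= n:
--             total += x - n + 1
--             c += 1
--         elif x >= 1:
--             buckets[x] += 1
--     for t in range(n - 1, 0, -1):
--         c += buckets[t]
--         total += t if c > t else c
--     return total
-- ===== Notes on version B (the rewrite author's own statement) =====
-- stated objective: faster
-- what changed: Replaces comparison sorting entirely: B makes one counting pass into value buckets (values capped at n handled by an arithmetic overflow term) and then accumulates the identity answer = sum over thresholds t of min(t, #elements >= t), O(n) with no sort or heap; it also fixes A's max scan that skips index 0.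
-- intended difference: On lists of length >= 2 whose first element is positive and all remaining elements are <= 0, A returns 0 (its max_value scan starts at index 1, so no heap extraction happens and the backward scan immediately hits a non-positive leaf), while B returns the first element, the intended total snow sum. — e.g. on snow([5, 0]): A returns 0, B returns 5
import Mathlib
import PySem

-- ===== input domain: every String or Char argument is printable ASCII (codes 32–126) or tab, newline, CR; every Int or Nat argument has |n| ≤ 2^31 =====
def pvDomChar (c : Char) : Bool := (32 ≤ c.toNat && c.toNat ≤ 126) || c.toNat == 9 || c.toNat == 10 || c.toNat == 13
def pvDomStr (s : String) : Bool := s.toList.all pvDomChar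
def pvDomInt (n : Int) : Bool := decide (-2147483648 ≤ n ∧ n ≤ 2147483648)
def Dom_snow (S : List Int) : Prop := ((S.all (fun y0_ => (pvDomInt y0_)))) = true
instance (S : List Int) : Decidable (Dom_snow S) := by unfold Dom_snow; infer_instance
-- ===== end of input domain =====

-- B replaces A's heap build + partial heap-sort + backward scan by a sort-free counting
-- method: one bucket-counting pass (values capped at n, the excess handled by an arithmetic
-- term) and one accumulation of min(t, #elements ≥ t) over thresholds t. A sorts its
-- argument in place (the equivalence proved here is about the RETURN value only; B does not
-- mutate). On lists whose first element is positive and all others ≤ 0, A's max scan (which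
-- skips index 0) makes A return 0; B returns the intended S[0] — stated below as D_snow.

-- ===== PORT A =====
-- arr[i], arr[max_ind] = arr[max_ind], arr[i]
def pvSwap (a : List Int) (i j : Nat) : List Int :=
  (a.set i (a.getD j 0)).set j (a.getD i 0)

-- the index picked by heapyfiy's two ifs (max_ind after both comparisons)
def pvMaxInd (a : List Int) (n i : Nat) : Nat :=
  if 2*i+1 < n ∧ a.getD i 0 < a.getD (2*i+1) 0 then
    (if 2*i+2 < n ∧ a.getD (2*i+1) 0 < a.getD (2*i+2) 0 then 2*i+2 else 2*i+1)
  else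
    (if 2*i+2 < n ∧ a.getD i 0 < a.getD (2*i+2) 0 then 2*i+2 else i)

-- heapyfiy; fuel n - i only makes the same recursion structural (each call strictly
-- increases i below n, so the fuel is never exhausted)
def heapifyF : Nat → List Int → Nat → Nat → List Int
  | 0, a, _, _ => a
  | f+1, a, n, i =>
      if pvMaxInd a n i = i then a
      else heapifyF f (pvSwap a i (pvMaxInd a n i)) n (pvMaxInd a n i)

def heapifyA (a : List Int) (n i : Nat) : List Int := heapifyF (n - i) a n i

-- build_heap: for i in range(parent(n-1), -1, -1): heapyfiy(arr, n, i)
def buildHeapA (a : List Int) : List Int :=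
  (PySem.List.pyRange (PySem.Int.floordiv ((a.length : Int) - 1 - 1) 2) (-1) (-1)).foldl
    (fun b i => heapifyA b a.length i.toNat) a

-- heap_sort(arr, max_val)
def heapSortA (a : List Int) (maxVal : Int) : List Int :=
  (PySem.List.pyRange ((a.length : Int) - 1)
      (if maxVal < (a.length : Int) then (a.length : Int) - maxVal - 1 else 0) (-1)).foldl
    (fun c i => heapifyA (pvSwap c 0 i.toNat) i.toNat 0) (buildHeapA a)

-- the final loop of snow: for i in range(len(S)-1, -1, -1) with early return
def scanA (T : List Int) : Nat → Int → Int → Int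
  | 0, c, _ => c
  | k+1, c, d =>
      if T.getD k 0 - d ≤ 0 then c
      else scanA T k (c + (T.getD k 0 - d)) (d + 1)

def snow (S : List Int) : Int :=
  scanA (heapSortA S ((PySem.List.pyRange 1 (S.length : Int) 1).foldl
    (fun m i => if m < PySem.List.pyGetD S i 0 then PySem.List.pyGetD S i 0 else m) 0)) S.length 0 0

-- ===== PORT B =====
-- first loop of Source B: an element ≥ n contributes its overflow x-n+1 to total and 1 to c,
-- an element in 1..n-1 increments its bucket (x.toNat is exact: the branch gives 1 ≤ x < n)
def snowAltStep (n : Int) (st : List Int × Int × Int) (x : Int) : List Int × Int × Int :=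
  if n ≤ x then (st.1, st.2.1 + (x - n + 1), st.2.2 + 1)
  else if 1 ≤ x then (st.1.set x.toNat (st.1.getD x.toNat 0 + 1), st.2.1, st.2.2)
  else st

def snow_alt (S : List Int) : Int :=
  let n : Int := (S.length : Int)
  let st := S.foldl (snowAltStep n) (List.replicate S.length 0, 0, 0)
  ((PySem.List.pyRange (n - 1) 0 (-1)).foldl
    (fun (p : Int × Int) t =>
      (p.1 + st.1.getD t.toNat 0,
       p.2 + (if t < p.1 + st.1.getD t.toNat 0 then t else p.1 + st.1.getD t.toNat 0)))
    (st.2.2, st.2.1)).2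

-- ===== PRECONDITION & SPEC =====
-- On lists of length ≥ 2 whose first element is positive and all remaining elements are ≤ 0,
-- A returns 0 (its max_value scan starts at index 1, so no heap extraction happens and the
-- backward scan immediately hits a non-positive leaf), while B returns the first element,
-- the intended total snow sum.
def D_snow (S : List Int) : Prop :=
  2 ≤ S.length ∧ 0 < S.headI ∧ ∀ x ∈ S.tail, x ≤ 0
instance (S : List Int) : Decidable (D_snow S) := by unfold D_snow; infer_instance

def Spec_snow (S : List Int) (out : Int) : Prop := ¬ D_snow S → out = snow_alt S
instance (S : List Int) (out : Int) : Decidable (Spec_snow S out) := by unfold Spec_snow; infer_instance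

def pvDiffWitness_snow : List Int := [5, 0]
def pvDiffWitnessOut_snow : Int × Int := (0, 5)

-- ===== CLAIM (what is proved, stated in full; the proofs are below) =====
def Claim_unchanged_snow : Prop := ∀ (S : List Int), Dom_snow S → Spec_snow S (snow S)
def Claim_changed_snow : Prop := Dom_snow (pvDiffWitness_snow) ∧ D_snow (pvDiffWitness_snow) ∧ snow (pvDiffWitness_snow) = pvDiffWitnessOut_snow.1 ∧ snow_alt (pvDiffWitness_snow) = pvDiffWitnessOut_snow.2 ∧ pvDiffWitnessOut_snow.1 ≠ pvDiffWitnessOut_snow.2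
def Claim_exact_snow : Prop := ∀ (S : List Int), Dom_snow S → D_snow S → snow S ≠ snow_alt S

-- ===== LEMMAS AND PROOFS =====

-- the reference value both programs compute: the early-exit greedy over the descending sort
def sumLoopB : List Int → Int → Int → Int
  | [], _, acc => acc
  | v :: rest, day, acc => if v ≤ day then acc else sumLoopB rest (day + 1) (acc + (v - day))

def sortedGreedy (S : List Int) : Int :=
  sumLoopB (PySem.List.sorted S (fun x => x) true) 0 0

-- ---- descendant relation on heap indices (parent chain) ----
def pvDesc (i j : Nat) : Bool :=
  if i = j then true else if j = 0 then false else pvDesc i ((j-1)/2)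
termination_by j
decreasing_by omega

lemma pvDesc_refl (i : Nat) : pvDesc i i = true := by rw [pvDesc]; simp

lemma pvDesc_of_parent {i j : Nat} (hj : j ≠ 0) (h : pvDesc i ((j-1)/2) = true) :
    pvDesc i j = true := by
  rw [pvDesc]; split_ifs <;> simp_all

lemma pvDesc_parent {i j : Nat} (h : pvDesc i j = true) :
    i = j ∨ (j ≠ 0 ∧ pvDesc i ((j-1)/2) = true) := by
  rw [pvDesc] at h; split_ifs at h <;> tauto

lemma pvDesc_le {i j : Nat} (h : pvDesc i j = true) : i ≤ j := by
  induction j using Nat.strong_induction_on with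
  | _ j ih =>
    rcases pvDesc_parent h with rfl | ⟨hj, h2⟩
    · exact le_refl _
    · have := ih ((j-1)/2) (by omega) h2; omega

lemma pvDesc_trans {a b c : Nat} (h1 : pvDesc a b = true) (h2 : pvDesc b c = true) :
    pvDesc a c = true := by
  induction c using Nat.strong_induction_on with
  | _ c ih =>
    rcases pvDesc_parent h2 with rfl | ⟨hc, h3⟩
    · exact h1
    · exact pvDesc_of_parent hc (ih ((c-1)/2) (by omega) h3)

lemma pvDesc_child_left (i : Nat) : pvDesc i (2*i+1) = true := by
  apply pvDesc_of_parent (by omega)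
  have : (2*i+1-1)/2 = i := by omega
  rw [this]; exact pvDesc_refl i

lemma pvDesc_child_right (i : Nat) : pvDesc i (2*i+2) = true := by
  apply pvDesc_of_parent (by omega)
  have : (2*i+2-1)/2 = i := by omega
  rw [this]; exact pvDesc_refl i

lemma pvDesc_cases {i j : Nat} (h : pvDesc i j = true) :
    j = i ∨ pvDesc (2*i+1) j = true ∨ pvDesc (2*i+2) j = true := by
  induction j using Nat.strong_induction_on with
  | _ j ih =>
    rcases pvDesc_parent h with rfl | ⟨hj, hp⟩
    · exact Or.inl rfl
    · rcases ih ((j-1)/2) (by omega) hp with hpi | hL | hR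
      · have : j = 2*i+1 ∨ j = 2*i+2 := by omega
        rcases this with rfl | rfl
        · exact Or.inr (Or.inl (pvDesc_refl _))
        · exact Or.inr (Or.inr (pvDesc_refl _))
      · exact Or.inr (Or.inl (pvDesc_of_parent hj hL))
      · exact Or.inr (Or.inr (pvDesc_of_parent hj hR))

lemma pvDesc_strict {m j : Nat} (h : pvDesc m j = true) (hne : j ≠ m) : 2*m+1 ≤ j := by
  rcases pvDesc_cases h with rfl | h | h
  · exact absurd rfl hne
  · have := pvDesc_le h; omega
  · have := pvDesc_le h; omega

lemma pvDesc_all (j : Nat) : pvDesc 0 j = true := by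
  induction j using Nat.strong_induction_on with
  | _ j ih =>
    rcases Nat.eq_zero_or_pos j with rfl | hj
    · exact pvDesc_refl 0
    · exact pvDesc_of_parent (by omega) (ih ((j-1)/2) (by omega))

lemma pvDesc_child_elim {m c : Nat} (h : pvDesc m c = true) :
    c = m ∨ pvDesc m ((c-1)/2) = true := by
  rcases pvDesc_parent h with rfl | ⟨_, h2⟩
  · exact Or.inl rfl
  · exact Or.inr h2

-- ---- getD / set / swap helpers ----
lemma getD_set_self {l : List Int} {i : Nat} {v : Int} (h : i < l.length) :
    (l.set i v).getD i 0 = v := by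
  rw [List.getD_eq_getElem _ _ (by simpa using h), List.getElem_set_self]

lemma getD_set_ne {l : List Int} {i j : Nat} {v : Int} (h : i ≠ j) :
    (l.set i v).getD j 0 = l.getD j 0 := by
  by_cases hj : j < l.length
  · rw [List.getD_eq_getElem _ _ (by simpa using hj), List.getD_eq_getElem _ _ hj,
      List.getElem_set_ne h]
  · rw [List.getD_eq_default _ _ (by simp; omega), List.getD_eq_default _ _ (by omega)]

lemma length_pvSwap (a : List Int) (i j : Nat) : (pvSwap a i j).length = a.length := by
  simp [pvSwap]

lemma getD_pvSwap_i {a : List Int} {i j : Nat} (hi : i < a.length) :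
    (pvSwap a i j).getD i 0 = a.getD j 0 := by
  by_cases hij : i = j
  · subst hij
    unfold pvSwap
    rw [getD_set_self (by simpa using hi), List.getD_eq_getElem _ _ hi]
  · unfold pvSwap
    rw [getD_set_ne (fun h => hij h.symm), getD_set_self hi]

lemma getD_pvSwap_j {a : List Int} {i j : Nat} (hi : i < a.length) (hj : j < a.length) :
    (pvSwap a i j).getD j 0 = a.getD i 0 := by
  unfold pvSwap
  rw [getD_set_self (by simpa using hj), List.getD_eq_getElem _ _ hi]

lemma getD_pvSwap_other {a : List Int} {i j k : Nat} (h1 : k ≠ i) (h2 : k ≠ j) :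
    (pvSwap a i j).getD k 0 = a.getD k 0 := by
  unfold pvSwap
  rw [getD_set_ne (fun h => h2 h.symm), getD_set_ne (fun h => h1 h.symm)]

lemma perm_cons_set (t : List Int) : ∀ (j : Nat), j < t.length → ∀ v : Int,
    ((t.getD j 0) :: t.set j v).Perm (v :: t) := by
  induction t with
  | nil => intro j hj; simp at hj
  | cons c t ih =>
    intro j hj v
    cases j with
    | zero => simpa using List.Perm.swap v c t
    | succ j =>
      have h1 : ((c :: t).getD (j+1) 0) = t.getD j 0 := by simp
      rw [h1]
      have h2 : (c :: t).set (j+1) v = c :: t.set j v := by simp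
      rw [h2]
      exact (List.Perm.swap _ _ _).trans
        ((List.Perm.cons c (ih j (by simpa using hj) v)).trans (List.Perm.swap _ _ _))

lemma perm_pvSwap : ∀ (a : List Int) (i j : Nat), i < a.length → j < a.length →
    (pvSwap a i j).Perm a := by
  intro a
  induction a with
  | nil => intro i j hi; simp at hi
  | cons h t ih =>
    intro i j hi hj
    cases i with
    | zero =>
      cases j with
      | zero => simp [pvSwap]
      | succ j =>
        have hjt : j < t.length := by simpa using hj
        have : pvSwap (h :: t) 0 (j+1) = (t.getD j 0) :: t.set j h := by
          simp [pvSwap]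
        rw [this]
        exact perm_cons_set t j hjt h
    | succ i =>
      cases j with
      | zero =>
        have hit : i < t.length := by simpa using hi
        have : pvSwap (h :: t) (i+1) 0 = (t.getD i 0) :: t.set i h := by
          simp [pvSwap]
        rw [this]
        exact perm_cons_set t i hit h
      | succ j =>
        have : pvSwap (h :: t) (i+1) (j+1) = h :: pvSwap t i j := by
          simp [pvSwap]
        rw [this]
        exact List.Perm.cons h (ih i j (by simpa using hi) (by simpa using hj))

-- ---- local heap property ----
def pvFine (a : List Int) (n j : Nat) : Prop :=
  (2*j+1 < n → a.getD (2*j+1) 0 ≤ a.getD j 0) ∧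
  (2*j+2 < n → a.getD (2*j+2) 0 ≤ a.getD j 0)

lemma pvFine_vacuous {a : List Int} {n j : Nat} (h : n ≤ 2*j+1) : pvFine a n j :=
  ⟨fun hc => absurd hc (by omega), fun hc => absurd hc (by omega)⟩

lemma pvMaxInd_spec (a : List Int) (n i : Nat) :
    (pvMaxInd a n i = i ∨
      ((pvMaxInd a n i = 2*i+1 ∨ pvMaxInd a n i = 2*i+2) ∧ i < pvMaxInd a n i ∧ pvMaxInd a n i < n)) ∧
    (a.getD i 0 ≤ a.getD (pvMaxInd a n i) 0) ∧
    (2*i+1 < n → a.getD (2*i+1) 0 ≤ a.getD (pvMaxInd a n i) 0) ∧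
    (2*i+2 < n → a.getD (2*i+2) 0 ≤ a.getD (pvMaxInd a n i) 0) ∧
    (pvMaxInd a n i ≠ i → a.getD i 0 < a.getD (pvMaxInd a n i) 0) := by
  unfold pvMaxInd
  by_cases h1 : 2*i+1 < n ∧ a.getD i 0 < a.getD (2*i+1) 0
  · rw [if_pos h1]
    obtain ⟨h1a, h1b⟩ := h1
    by_cases h2 : 2*i+2 < n ∧ a.getD (2*i+1) 0 < a.getD (2*i+2) 0
    · rw [if_pos h2]
      obtain ⟨h2a, h2b⟩ := h2
      exact ⟨Or.inr ⟨Or.inr rfl, by omega, h2a⟩, by omega, fun _ => by omega,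
        fun _ => le_refl _, fun _ => by omega⟩
    · rw [if_neg h2]
      refine ⟨Or.inr ⟨Or.inl rfl, by omega, h1a⟩, by omega, fun _ => le_refl _, ?_,
        fun _ => h1b⟩
      intro hc
      have h2' : ¬(a.getD (2*i+1) 0 < a.getD (2*i+2) 0) := fun hx => h2 ⟨hc, hx⟩
      omega
  · rw [if_neg h1]
    by_cases h2 : 2*i+2 < n ∧ a.getD i 0 < a.getD (2*i+2) 0
    · rw [if_pos h2]
      obtain ⟨h2a, h2b⟩ := h2
      refine ⟨Or.inr ⟨Or.inr rfl, by omega, h2a⟩, by omega, ?_, fun _ => le_refl _,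
        fun _ => h2b⟩
      intro hc
      have h1' : ¬(a.getD i 0 < a.getD (2*i+1) 0) := fun hx => h1 ⟨hc, hx⟩
      omega
    · rw [if_neg h2]
      refine ⟨Or.inl rfl, le_refl _, ?_, ?_, fun hmi => absurd rfl hmi⟩
      · intro hc
        have h1' : ¬(a.getD i 0 < a.getD (2*i+1) 0) := fun hx => h1 ⟨hc, hx⟩
        omega
      · intro hc
        have h2' : ¬(a.getD i 0 < a.getD (2*i+2) 0) := fun hx => h2 ⟨hc, hx⟩
        omega

lemma rootMax (a : List Int) (n : Nat) :
    ∀ (d r k : Nat), k - r ≤ d →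
      (∀ k', pvDesc r k' = true → k' < n → pvFine a n k') →
      pvDesc r k = true → k < n → a.getD k 0 ≤ a.getD r 0 := by
  intro d
  induction d with
  | zero =>
    intro r k hd _ hdesc _
    have := pvDesc_le hdesc
    have : k = r := by omega
    subst this; exact le_refl _
  | succ d ih =>
    intro r k hd hfine hdesc hk
    rcases pvDesc_cases hdesc with rfl | hL | hR
    · exact le_refl _
    · have h1 : 2*r+1 ≤ k := pvDesc_le hL
      have h2 : a.getD k 0 ≤ a.getD (2*r+1) 0 := by
        apply ih (2*r+1) k (by omega)
        · intro k' hk' hk'n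
          exact hfine k' (pvDesc_trans (pvDesc_child_left r) hk') hk'n
        · exact hL
        · exact hk
      have h3 := (hfine r (pvDesc_refl r) (by omega)).1 (by omega)
      omega
    · have h1 : 2*r+2 ≤ k := pvDesc_le hR
      have h2 : a.getD k 0 ≤ a.getD (2*r+2) 0 := by
        apply ih (2*r+2) k (by omega)
        · intro k' hk' hk'n
          exact hfine k' (pvDesc_trans (pvDesc_child_right r) hk') hk'n
        · exact hR
        · exact hk
      have h3 := (hfine r (pvDesc_refl r) (by omega)).2 (by omega)
      omega

-- ---- heapify specification ----
lemma heapifyF_spec : ∀ (f : Nat) (a : List Int) (n i : Nat),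
    n ≤ a.length → n - i ≤ f →
    (∀ j, pvDesc i j = true → j ≠ i → j < n → pvFine a n j) →
    (heapifyF f a n i).length = a.length ∧
    (heapifyF f a n i).Perm a ∧
    (∀ j, (pvDesc i j ≠ true ∨ n ≤ j) → (heapifyF f a n i).getD j 0 = a.getD j 0) ∧
    (∀ j, pvDesc i j = true → j < n → pvFine (heapifyF f a n i) n j) ∧
    (∀ B : Int, (∀ j, pvDesc i j = true → j < n → a.getD j 0 ≤ B) →
      ∀ j, pvDesc i j = true → j < n → (heapifyF f a n i).getD j 0 ≤ B) := by
  intro f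
  induction f with
  | zero =>
    intro a n i hn hf hpre
    refine ⟨rfl, List.Perm.refl _, fun j _ => rfl, ?_, fun B hB j hd hj => hB j hd hj⟩
    intro j hd hj
    have := pvDesc_le hd
    exact absurd hj (by omega)
  | succ f ih =>
    intro a n i hn hf hpre
    by_cases hm : pvMaxInd a n i = i
    · simp only [heapifyF, hm]
      obtain ⟨_, _, hgl, hgr, _⟩ := pvMaxInd_spec a n i
      rw [hm] at hgl hgr
      refine ⟨rfl, List.Perm.refl _, fun j _ => rfl, ?_, fun B hB j hd hj => hB j hd hj⟩
      intro j hd hj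
      by_cases hji : j = i
      · subst hji; exact ⟨hgl, hgr⟩
      · exact hpre j hd hji hj
    · simp only [heapifyF, if_neg hm]
      obtain ⟨hcase, hgi, hgl, hgr, hlt⟩ := pvMaxInd_spec a n i
      set m := pvMaxInd a n i with hmdef
      rcases hcase with h | ⟨hshape, him, hmn⟩
      · exact absurd h hm
      have hin : i < n := by omega
      have hil : i < a.length := by omega
      have hml : m < a.length := by omega
      have hdim : pvDesc i m = true := by
        rcases hshape with h | h
        · rw [h]; exact pvDesc_child_left i
        · rw [h]; exact pvDesc_child_right i
      -- the swapped array
      set b := pvSwap a i m with hbdef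
      have hblen : b.length = a.length := length_pvSwap a i m
      have hb_i : b.getD i 0 = a.getD m 0 := getD_pvSwap_i hil
      have hb_m : b.getD m 0 = a.getD i 0 := getD_pvSwap_j hil hml
      have hb_other : ∀ k, k ≠ i → k ≠ m → b.getD k 0 = a.getD k 0 :=
        fun k h1 h2 => getD_pvSwap_other h1 h2
      -- root-max over the m-subtree of a
      have hsubfine : ∀ k', pvDesc m k' = true → k' < n → pvFine a n k' := by
        intro k' hk' hk'n
        by_cases hk'm : k' = m
        · subst hk'm; exact hpre m hdim (by omega) hmn
        · exact hpre k' (pvDesc_trans hdim hk') (by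
            have := pvDesc_strict hk' hk'm; omega) hk'n
      have hsubmax : ∀ k, pvDesc m k = true → k < n → a.getD k 0 ≤ a.getD m 0 :=
        fun k hk hkn => rootMax a n k m k (Nat.sub_le _ _) hsubfine hk hkn
      -- precondition for the recursive call
      have hpre' : ∀ j, pvDesc m j = true → j ≠ m → j < n → pvFine b n j := by
        intro j hd hne hj
        have hjm : 2*m+1 ≤ j := pvDesc_strict hd hne
        have hfj := hpre j (pvDesc_trans hdim hd) (by omega) hj
        constructor
        · intro hc
          rw [hb_other (2*j+1) (by omega) (by omega), hb_other j (by omega) (by omega)]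
          exact hfj.1 hc
        · intro hc
          rw [hb_other (2*j+2) (by omega) (by omega), hb_other j (by omega) (by omega)]
          exact hfj.2 hc
      obtain ⟨Rlen, Rperm, Runt, Rfine, Rbound⟩ :=
        ih b n m (by omega) (by omega) hpre'
      set c := heapifyF f b n m with hcdef
      have hndm : ∀ j, pvDesc m j = true → pvDesc i j = true :=
        fun j hd => pvDesc_trans hdim hd
      have hc_i : c.getD i 0 = a.getD m 0 := by
        rw [Runt i (Or.inl (by
          intro hdi; have := pvDesc_le hdi; omega)), hb_i]
      refine ⟨Rlen.trans hblen, Rperm.trans (perm_pvSwap a i m hil hml), ?_, ?_, ?_⟩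
      · -- untouched
        intro j hj
        have hji : j ≠ i := by
          rcases hj with hj | hj
          · intro he; exact hj (by rw [he]; exact pvDesc_refl i)
          · omega
        have hjm : j ≠ m := by
          rcases hj with hj | hj
          · intro he; exact hj (by rw [he]; exact hdim)
          · omega
        have hjm' : pvDesc m j ≠ true ∨ n ≤ j := by
          rcases hj with hj | hj
          · exact Or.inl (fun hd => hj (hndm j hd))
          · exact Or.inr hj
        rw [Runt j hjm', hb_other j hji hjm]
      · -- fine
        intro j hd hj
        by_cases hdm : pvDesc m j = true
        · exact Rfine j hdm hj
        by_cases hji : j = i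
        · subst hji
          have key : ∀ s, (s = 2*j+1 ∨ s = 2*j+2) → s < n → c.getD s 0 ≤ c.getD j 0 := by
            intro s hs hsn
            rw [hc_i]
            by_cases hsm : s = m
            · rw [hsm]
              apply Rbound (a.getD m 0) ?_ m (pvDesc_refl m) (hsm ▸ hsn)
              intro k hk hkn
              by_cases hkm : k = m
              · rw [hkm, hb_m]; omega
              · rw [hb_other k (by
                    have := pvDesc_strict hk hkm; omega) hkm]
                exact hsubmax k hk hkn
            · have hnds : pvDesc m s ≠ true := by
                intro hds
                have := pvDesc_strict hds hsm
                rcases hshape with h | h <;> omega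
              rw [Runt s (Or.inl hnds), hb_other s (by omega) hsm]
              rcases hs with rfl | rfl
              · exact hgl hsn
              · exact hgr hsn
          exact ⟨fun hc => key _ (Or.inl rfl) hc, fun hc => key _ (Or.inr rfl) hc⟩
        · -- j in subtree of i, not of m, not i itself: untouched together with its children
          have hji' : i < j := by
            have h1 := pvDesc_le hd
            omega
          have hjm : j ≠ m := fun he => hdm (he ▸ pvDesc_refl m)
          have hchild : ∀ s, (s = 2*j+1 ∨ s = 2*j+2) → pvDesc m s ≠ true := by
            intro s hs hds
            have hps : (s-1)/2 = j := by rcases hs with rfl | rfl <;> omega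
            rcases pvDesc_child_elim hds with hsm | hdj
            · have hpm : (m-1)/2 = i := by rcases hshape with h | h <;> omega
              rw [hsm] at hps
              omega
            · rw [hps] at hdj; exact hdm hdj
          have hfj := hpre j hd hji hj
          have hgj : c.getD j 0 = a.getD j 0 := by
            rw [Runt j (Or.inl hdm), hb_other j (by omega) hjm]
          constructor
          · intro hc
            rw [hgj, Runt (2*j+1) (Or.inl (hchild _ (Or.inl rfl))),
              hb_other (2*j+1) (by omega) (fun he => hchild _ (Or.inl rfl) (he ▸ pvDesc_refl m))]
            exact hfj.1 hc
          · intro hc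
            rw [hgj, Runt (2*j+2) (Or.inl (hchild _ (Or.inr rfl))),
              hb_other (2*j+2) (by omega) (fun he => hchild _ (Or.inr rfl) (he ▸ pvDesc_refl m))]
            exact hfj.2 hc
      · -- bound
        intro B hB j hd hj
        by_cases hdm : pvDesc m j = true
        · apply Rbound B ?_ j hdm hj
          intro k hk hkn
          by_cases hkm : k = m
          · subst hkm; rw [hb_m]; exact hB i (pvDesc_refl i) hin
          · rw [hb_other k (by have := pvDesc_strict hk hkm; omega) hkm]
            exact hB k (hndm k hk) hkn
        · have hgj : c.getD j 0 = b.getD j 0 := Runt j (Or.inl hdm)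
          by_cases hji : j = i
          · subst hji; rw [hgj, hb_i]; exact hB m hdim hmn
          · rw [hgj, hb_other j hji (fun he => hdm (he ▸ pvDesc_refl m))]
            exact hB j hd hj

lemma heapifyA_spec (a : List Int) (n i : Nat) (hn : n ≤ a.length)
    (hpre : ∀ j, pvDesc i j = true → j ≠ i → j < n → pvFine a n j) :
    (heapifyA a n i).length = a.length ∧
    (heapifyA a n i).Perm a ∧
    (∀ j, (pvDesc i j ≠ true ∨ n ≤ j) → (heapifyA a n i).getD j 0 = a.getD j 0) ∧
    (∀ j, pvDesc i j = true → j < n → pvFine (heapifyA a n i) n j) ∧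
    (∀ B : Int, (∀ j, pvDesc i j = true → j < n → a.getD j 0 ≤ B) →
      ∀ j, pvDesc i j = true → j < n → (heapifyA a n i).getD j 0 ≤ B) :=
  heapifyF_spec (n - i) a n i hn (le_refl _) hpre

-- ---- pointwise / permutation list utilities ----
lemma drop_eq_of_getD {x y : List Int} (k : Nat) (hlen : x.length = y.length)
    (h : ∀ j, k ≤ j → x.getD j 0 = y.getD j 0) : x.drop k = y.drop k := by
  apply List.ext_getElem (by simp [hlen])
  intro i h1 h2
  have hik : k + i < x.length := by simp at h1; omega
  rw [List.getElem_drop, List.getElem_drop, ← List.getD_eq_getElem x 0 hik,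
    ← List.getD_eq_getElem y 0 (by omega), h (k+i) (by omega)]

lemma take_perm_of_perm {x y : List Int} (k : Nat) (hp : x.Perm y) (hd : x.drop k = y.drop k) :
    (x.take k).Perm (y.take k) := by
  have h1 : (x.take k ++ x.drop k).Perm (y.take k ++ y.drop k) := by
    rw [List.take_append_drop, List.take_append_drop]; exact hp
  rw [hd] at h1
  exact (List.perm_append_right_iff _).mp h1

-- ---- build_heap loop ----
lemma buildLoop_spec (n : Nat) : ∀ (k : Nat) (a : List Int), n ≤ a.length →
    (∀ j, k < j → j < n → pvFine a n j) →
    ((PySem.List.pyRange ((k : Nat) : Int) (-1) (-1)).foldl (fun b i => heapifyA b n i.toNat) a).length = a.length ∧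
    ((PySem.List.pyRange ((k : Nat) : Int) (-1) (-1)).foldl (fun b i => heapifyA b n i.toNat) a).Perm a ∧
    (∀ j, j < n → pvFine ((PySem.List.pyRange ((k : Nat) : Int) (-1) (-1)).foldl (fun b i => heapifyA b n i.toNat) a) n j) := by
  intro k
  induction k with
  | zero =>
    intro a hn hinv
    have hcons : PySem.List.pyRange ((0:Nat):Int) (-1) (-1) = [(0:Int)] := by
      rw [PySem.List.pyRange_neg_one_cons (by norm_num)]
      norm_num [PySem.List.pyRange_neg_one_eq_nil]
    rw [hcons]
    simp only [List.foldl, Int.toNat_zero]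
    obtain ⟨hl, hp, _, hf, _⟩ := heapifyA_spec a n 0 hn
      (fun j hd hne hj => hinv j (by have := pvDesc_strict hd hne; omega) hj)
    exact ⟨hl, hp, fun j hj => hf j (pvDesc_all j) hj⟩
  | succ k ih =>
    intro a hn hinv
    have hcons : PySem.List.pyRange ((k+1:Nat):Int) (-1) (-1)
        = ((k+1:Nat):Int) :: PySem.List.pyRange ((k:Nat):Int) (-1) (-1) := by
      rw [PySem.List.pyRange_neg_one_cons (by omega)]
      congr 1
      push_cast; ring
    rw [hcons]
    simp only [List.foldl, Int.toNat_natCast]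
    obtain ⟨hl, hp, hunt, hf, _⟩ := heapifyA_spec a n (k+1) hn
      (fun j hd hne hj => hinv j (by have := pvDesc_strict hd hne; omega) hj)
    have hinv1 : ∀ j, k < j → j < n → pvFine (heapifyA a n (k+1)) n j := by
      intro j hj hjn
      by_cases hdj : pvDesc (k+1) j = true
      · exact hf j hdj hjn
      · have hne : j ≠ k+1 := fun he => hdj (by rw [he]; exact pvDesc_refl _)
        have hnc : ∀ s, (s = 2*j+1 ∨ s = 2*j+2) → pvDesc (k+1) s ≠ true := by
          intro s hs hds
          rcases pvDesc_child_elim hds with h | h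
          · omega
          · have hps : (s-1)/2 = j := by omega
            rw [hps] at h; exact hdj h
        have hfj := hinv j (by omega) hjn
        constructor
        · intro hc
          rw [hunt j (Or.inl hdj), hunt (2*j+1) (Or.inl (hnc _ (Or.inl rfl)))]
          exact hfj.1 hc
        · intro hc
          rw [hunt j (Or.inl hdj), hunt (2*j+2) (Or.inl (hnc _ (Or.inr rfl)))]
          exact hfj.2 hc
    obtain ⟨hl2, hp2, hfin⟩ := ih (heapifyA a n (k+1)) (by rw [hl]; exact hn) hinv1
    exact ⟨hl2.trans hl, hp2.trans hp, hfin⟩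

lemma buildHeapA_spec (a : List Int) :
    (buildHeapA a).length = a.length ∧ (buildHeapA a).Perm a ∧
    (∀ j, j < a.length → pvFine (buildHeapA a) a.length j) := by
  unfold buildHeapA
  by_cases hsmall : a.length ≤ 1
  · have hnil : PySem.List.pyRange (PySem.Int.floordiv ((a.length:Int) - 1 - 1) 2) (-1) (-1) = [] := by
      apply PySem.List.pyRange_neg_one_eq_nil
      have : a.length = 0 ∨ a.length = 1 := by omega
      rcases this with h | h <;> rw [h] <;> decide
    rw [hnil]
    exact ⟨rfl, List.Perm.refl _, fun j hj => pvFine_vacuous (by omega)⟩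
  · have h2 : 2 ≤ a.length := by omega
    have hP : PySem.Int.floordiv ((a.length:Int) - 1 - 1) 2 = (((a.length - 2)/2 : Nat) : Int) := by
      have he : ((a.length:Int) - 1 - 1) = ((a.length - 2 : Nat) : Int) := by
        rw [Nat.cast_sub h2]; ring
      rw [he]
      exact_mod_cast PySem.Int.floordiv_natCast (a.length - 2) 2
    rw [hP]
    exact buildLoop_spec a.length ((a.length-2)/2) a (le_refl _)
      (fun j hj hjn => pvFine_vacuous (by omega))

-- ---- extraction loop ----
lemma extractLoop_spec : ∀ (c : Nat) (a : List Int) (s : Nat), s + c < a.length →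
    (∀ j, j < s + c + 1 → pvFine a (s + c + 1) j) →
    List.Pairwise (· ≤ ·) (a.drop (s + c + 1)) →
    (∀ x ∈ a.take (s + c + 1), ∀ y ∈ a.drop (s + c + 1), x ≤ y) →
    ((PySem.List.pyRange ((s + c : Nat) : Int) ((s : Nat) : Int) (-1)).foldl
        (fun b i => heapifyA (pvSwap b 0 i.toNat) i.toNat 0) a).length = a.length ∧
    ((PySem.List.pyRange ((s + c : Nat) : Int) ((s : Nat) : Int) (-1)).foldl
        (fun b i => heapifyA (pvSwap b 0 i.toNat) i.toNat 0) a).Perm a ∧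
    List.Pairwise (· ≤ ·) (((PySem.List.pyRange ((s + c : Nat) : Int) ((s : Nat) : Int) (-1)).foldl
        (fun b i => heapifyA (pvSwap b 0 i.toNat) i.toNat 0) a).drop (s + 1)) ∧
    (∀ x ∈ ((PySem.List.pyRange ((s + c : Nat) : Int) ((s : Nat) : Int) (-1)).foldl
        (fun b i => heapifyA (pvSwap b 0 i.toNat) i.toNat 0) a).take (s + 1),
      ∀ y ∈ ((PySem.List.pyRange ((s + c : Nat) : Int) ((s : Nat) : Int) (-1)).foldl
        (fun b i => heapifyA (pvSwap b 0 i.toNat) i.toNat 0) a).drop (s + 1), x ≤ y) := by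
  intro c
  induction c with
  | zero =>
    intro a s hlen h1 h2 h3
    have hnil : PySem.List.pyRange ((s + 0 : Nat) : Int) ((s : Nat) : Int) (-1) = [] :=
      PySem.List.pyRange_neg_one_eq_nil (by omega)
    rw [hnil]
    exact ⟨rfl, List.Perm.refl _, h2, h3⟩
  | succ c ih =>
    intro a s hlen h1 h2 h3
    have hE : s + (c+1) = s + c + 1 := by omega
    simp only [hE] at hlen h1 h2 h3 ⊢
    have hi : s + c + 1 < a.length := by omega
    have h0l : 0 < a.length := by omega
    have hcons : PySem.List.pyRange ((s + c + 1 : Nat) : Int) ((s : Nat) : Int) (-1)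
        = ((s+c+1 : Nat) : Int) :: PySem.List.pyRange ((s + c : Nat) : Int) ((s : Nat) : Int) (-1) := by
      have h1' : ((s:Nat):Int) < ((s + c + 1 : Nat) : Int) := by push_cast; omega
      rw [PySem.List.pyRange_neg_one_cons h1',
        show ((s + c + 1 : Nat) : Int) - 1 = ((s + c : Nat) : Int) by push_cast; ring]
    rw [hcons]
    simp only [List.foldl, Int.toNat_natCast]
    have hmax : ∀ k, k < s + c + 2 → a.getD k 0 ≤ a.getD 0 0 := by
      intro k hk
      exact rootMax a (s+c+2) k 0 k (Nat.sub_le _ _) (fun k' _ hk' => h1 k' (by omega))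
        (pvDesc_all k) (by omega)
    have hb0 : (pvSwap a 0 (s+c+1)).getD 0 0 = a.getD (s+c+1) 0 := getD_pvSwap_i h0l
    have hbi : (pvSwap a 0 (s+c+1)).getD (s+c+1) 0 = a.getD 0 0 := getD_pvSwap_j h0l hi
    have hbo : ∀ k, k ≠ 0 → k ≠ s+c+1 → (pvSwap a 0 (s+c+1)).getD k 0 = a.getD k 0 :=
      fun k hk1 hk2 => getD_pvSwap_other hk1 hk2
    have hblen : (pvSwap a 0 (s+c+1)).length = a.length := length_pvSwap a 0 (s+c+1)
    have hpre : ∀ j, pvDesc 0 j = true → j ≠ 0 → j < s+c+1 → pvFine (pvSwap a 0 (s+c+1)) (s+c+1) j := by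
      intro j _ hj0 hji
      have hfj := h1 j (by omega)
      constructor
      · intro hc
        rw [hbo (2*j+1) (by omega) (by omega), hbo j hj0 (by omega)]
        exact hfj.1 (by omega)
      · intro hc
        rw [hbo (2*j+2) (by omega) (by omega), hbo j hj0 (by omega)]
        exact hfj.2 (by omega)
    obtain ⟨Rlen, Rperm, Runt, Rfine, _⟩ :=
      heapifyA_spec (pvSwap a 0 (s+c+1)) (s+c+1) 0 (by rw [hblen]; omega) hpre
    have hdropeq : (heapifyA (pvSwap a 0 (s+c+1)) (s+c+1) 0).drop (s+c+1)
        = (pvSwap a 0 (s+c+1)).drop (s+c+1) :=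
      drop_eq_of_getD (s+c+1) Rlen (fun j hj => Runt j (Or.inr hj))
    have hbl' : s+c+1 < (pvSwap a 0 (s+c+1)).length := by rw [hblen]; omega
    have hbdrop : (pvSwap a 0 (s+c+1)).drop (s+c+1) = a.getD 0 0 :: a.drop (s+c+2) := by
      rw [List.drop_eq_getElem_cons hbl']
      congr 1
      · rw [← List.getD_eq_getElem _ 0 hbl']; exact hbi
      · show ((a.set 0 (a.getD (s+c+1) 0)).set (s+c+1) (a.getD 0 0)).drop (s+c+2) = a.drop (s+c+2)
        rw [List.drop_set_of_lt (by omega : s+c+1 < s+c+2),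
          List.drop_set_of_lt (by omega : 0 < s+c+2)]
    have h0mem : a.getD 0 0 ∈ a.take (s+c+2) :=
      List.mem_take_iff_getElem.mpr ⟨0, by omega, (List.getD_eq_getElem a 0 h0l).symm⟩
    have hpair' : List.Pairwise (· ≤ ·) ((heapifyA (pvSwap a 0 (s+c+1)) (s+c+1) 0).drop (s+c+1)) := by
      rw [hdropeq, hbdrop]
      exact List.Pairwise.cons (fun y hy => h3 _ h0mem y hy) h2
    have hbtake : ∀ x ∈ (pvSwap a 0 (s+c+1)).take (s+c+1),
        x ≤ a.getD 0 0 ∧ ∀ y ∈ a.drop (s+c+2), x ≤ y := by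
      intro x hx
      obtain ⟨jx, hjx, hval⟩ := List.mem_take_iff_getElem.mp hx
      have hjx' : jx < s+c+1 := by omega
      have hjxl : jx < a.length := by omega
      by_cases hj0 : jx = 0
      · have : x = a.getD (s+c+1) 0 := by
          rw [← hval, ← List.getD_eq_getElem _ 0 (by omega), hj0, hb0]
        rw [this]
        constructor
        · exact hmax (s+c+1) (by omega)
        · intro y hy
          exact h3 _ (List.mem_take_iff_getElem.mpr
            ⟨s+c+1, by omega, (List.getD_eq_getElem a 0 hi).symm⟩) y hy
      · have : x = a.getD jx 0 := by
          rw [← hval, ← List.getD_eq_getElem _ 0 (by omega), hbo jx hj0 (by omega)]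
        rw [this]
        constructor
        · exact hmax jx (by omega)
        · intro y hy
          exact h3 _ (List.mem_take_iff_getElem.mpr
            ⟨jx, by omega, (List.getD_eq_getElem a 0 hjxl).symm⟩) y hy
    have htakeperm : ((heapifyA (pvSwap a 0 (s+c+1)) (s+c+1) 0).take (s+c+1)).Perm
        ((pvSwap a 0 (s+c+1)).take (s+c+1)) :=
      take_perm_of_perm (s+c+1) Rperm hdropeq
    have hcross' : ∀ x ∈ (heapifyA (pvSwap a 0 (s+c+1)) (s+c+1) 0).take (s+c+1),
        ∀ y ∈ (heapifyA (pvSwap a 0 (s+c+1)) (s+c+1) 0).drop (s+c+1), x ≤ y := by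
      intro x hx y hy
      have hx' := hbtake x (htakeperm.mem_iff.mp hx)
      rw [hdropeq, hbdrop] at hy
      rcases List.mem_cons.mp hy with rfl | hy'
      · exact hx'.1
      · exact hx'.2 y hy'
    have harg : ∀ j, j < s + c + 1 → pvFine (heapifyA (pvSwap a 0 (s+c+1)) (s+c+1) 0) (s+c+1) j :=
      fun j hj => Rfine j (pvDesc_all j) hj
    obtain ⟨Flen, Fperm, Fpair, Fcross⟩ := ih (heapifyA (pvSwap a 0 (s+c+1)) (s+c+1) 0) s
      (by rw [Rlen, hblen]; omega) harg hpair' hcross'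
    refine ⟨by rw [Flen, Rlen, hblen], ?_, Fpair, Fcross⟩
    exact Fperm.trans (Rperm.trans (perm_pvSwap a 0 (s+c+1) h0l hi))

-- ---- heap_sort combined ----
lemma heapSortA_spec (a : List Int) (mv : Int) (sN : Nat) (hmv : 0 ≤ mv) (hlen : 1 ≤ a.length)
    (hsN : (sN : Int) = if mv < (a.length : Int) then (a.length : Int) - mv - 1 else 0) :
    (heapSortA a mv).length = a.length ∧ (heapSortA a mv).Perm a ∧
    List.Pairwise (· ≤ ·) ((heapSortA a mv).drop (sN+1)) ∧
    (∀ x ∈ (heapSortA a mv).take (sN+1), ∀ y ∈ (heapSortA a mv).drop (sN+1), x ≤ y) := by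
  have hsn1 : sN ≤ a.length - 1 := by
    by_cases h : mv < (a.length : Int)
    · rw [if_pos h] at hsN; omega
    · rw [if_neg h] at hsN; omega
  obtain ⟨Blen, Bperm, Bfine⟩ := buildHeapA_spec a
  have hrange : (PySem.List.pyRange ((a.length : Int) - 1)
      (if mv < (a.length : Int) then (a.length : Int) - mv - 1 else 0) (-1))
      = PySem.List.pyRange ((sN + (a.length - 1 - sN) : Nat) : Int) ((sN : Nat) : Int) (-1) := by
    congr 1
    · push_cast; omega
    · rw [hsN]
  have hmain := extractLoop_spec (a.length - 1 - sN) (buildHeapA a) sN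
    (by rw [Blen]; omega)
    (by
      intro j hj
      rw [show sN + (a.length - 1 - sN) + 1 = a.length from by omega]
      exact Bfine j (by omega))
    (by
      have : (buildHeapA a).drop (sN + (a.length - 1 - sN) + 1) = [] := by
        apply List.drop_eq_nil_of_le
        rw [Blen]; omega
      rw [this]; exact List.Pairwise.nil)
    (by
      intro x _ y hy
      have : (buildHeapA a).drop (sN + (a.length - 1 - sN) + 1) = [] := by
        apply List.drop_eq_nil_of_le
        rw [Blen]; omega
      rw [this] at hy; simp at hy)
  rw [show heapSortA a mv = ((PySem.List.pyRange ((sN + (a.length - 1 - sN) : Nat) : Int) ((sN : Nat) : Int) (-1)).foldl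
      (fun c i => heapifyA (pvSwap c 0 i.toNat) i.toNat 0) (buildHeapA a)) from by
    unfold heapSortA; rw [hrange]]
  obtain ⟨Elen, Eperm, Epair, Ecross⟩ := hmain
  exact ⟨by rw [Elen, Blen], Eperm.trans Bperm, Epair, Ecross⟩

-- ---- scanA reads the array back to front: it is sumLoopB on the reversed prefix ----
lemma scanA_eq_sumLoopB (T : List Int) : ∀ (k : Nat), k ≤ T.length → ∀ (c d : Int),
    scanA T k c d = sumLoopB ((T.take k).reverse) d c := by
  intro k
  induction k with
  | zero => intro _ c d; simp [scanA, sumLoopB]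
  | succ k ih =>
    intro hk c d
    have hkl : k < T.length := by omega
    have htake : T.take (k+1) = T.take k ++ [T[k]] := by
      rw [List.take_succ, List.getElem?_eq_getElem hkl]
      rfl
    have hrev : (T.take (k+1)).reverse = T[k] :: (T.take k).reverse := by
      rw [htake]; simp
    rw [hrev]
    simp only [scanA, sumLoopB]
    rw [List.getD_eq_getElem T 0 hkl]
    by_cases hc : T[k] - d ≤ 0
    · rw [if_pos hc, if_pos (by omega)]
    · rw [if_neg hc, if_neg (by omega), ih (by omega)]

-- ---- both summation passes agree once every later element is dominated by the day ----
lemma sumLoopB_congr : ∀ (s p q : List Int) (i acc : Int), p.length = q.length →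
    (∀ x ∈ p, x ≤ i + (s.length : Int)) → (∀ x ∈ q, x ≤ i + (s.length : Int)) →
    sumLoopB (s ++ p) i acc = sumLoopB (s ++ q) i acc := by
  intro s
  induction s with
  | nil =>
    intro p q i acc hlen hp hq
    cases p with
    | nil =>
      cases q with
      | nil => rfl
      | cons b q' => simp at hlen
    | cons a p' =>
      cases q with
      | nil => simp at hlen
      | cons b q' =>
        simp only [List.nil_append, sumLoopB]
        have ha : a ≤ i := by have := hp a (by simp); simpa using this
        have hb : b ≤ i := by have := hq b (by simp); simpa using this
        rw [if_pos ha, if_pos hb]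
  | cons v s ih =>
    intro p q i acc hlen hp hq
    simp only [List.cons_append, sumLoopB]
    by_cases hv : v ≤ i
    · rw [if_pos hv, if_pos hv]
    · rw [if_neg hv, if_neg hv]
      apply ih p q (i+1) _ hlen
      · intro x hx
        have h' := hp x hx
        simp only [List.length_cons] at h'
        push_cast at h' ⊢
        omega
      · intro x hx
        have h' := hq x hx
        simp only [List.length_cons] at h'
        push_cast at h' ⊢
        omega

-- ---- descending sort splits along a dominated partition ----
lemma wsort_split (S P Q : List Int) (hperm : (P ++ Q).Perm S)
    (hQ : List.Pairwise (· ≤ ·) Q) (hcross : ∀ x ∈ P, ∀ y ∈ Q, x ≤ y) :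
    PySem.List.sorted S (fun x => x) true = Q.reverse ++ PySem.List.sorted P (fun x => x) true := by
  apply List.eq_of_perm_of_sorted (le := fun a b : Int => b ≤ a)
  · intro a b _ _ h1 h2; exact le_antisymm h2 h1
  · exact PySem.List.sorted_pairwise_rev S (fun x => x)
  · rw [List.pairwise_append]
    refine ⟨?_, PySem.List.sorted_pairwise_rev P (fun x => x), ?_⟩
    · exact List.pairwise_reverse.mpr hQ
    · intro y hy z hz
      rw [List.mem_reverse] at hy
      have hz' : z ∈ P := (PySem.List.mem_sorted P (fun x => x) true z).mp hz
      exact hcross z hz' y hy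
  · have h1 : (PySem.List.sorted S (fun x => x) true).Perm S :=
      PySem.List.sorted_perm S (fun x => x) true
    have h2 : (Q.reverse ++ PySem.List.sorted P (fun x => x) true).Perm (Q ++ P) :=
      List.Perm.append (List.reverse_perm Q) (PySem.List.sorted_perm P (fun x => x) true)
    exact h1.trans (hperm.symm.trans (List.perm_append_comm.trans h2.symm))

-- ---- the max_value loop of snow is a fold of max over the tail ----
lemma ifmax_eq : (fun (m x : Int) => if m < x then x else m) = (fun (m x : Int) => max m x) := by
  funext m x
  by_cases h : m < x
  · rw [if_pos h, max_eq_right (le_of_lt h)]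
  · rw [if_neg h, max_eq_left (by omega)]

lemma snow_mv (S : List Int) :
    (PySem.List.pyRange 1 (S.length : Int) 1).foldl
      (fun m i => if m < PySem.List.pyGetD S i 0 then PySem.List.pyGetD S i 0 else m) 0
    = S.tail.foldl max 0 := by
  have h := PySem.List.foldl_pyRange_pyGetD' S 0 (fun m x => if m < x then x else m) 0
    (by omega : (0:Int) ≤ 1)
  refine h.trans ?_
  rw [show Int.toNat 1 = 1 from rfl, List.drop_one, ifmax_eq]

lemma foldl_max_nonpos : ∀ (t : List Int), (∀ x ∈ t, x ≤ 0) → t.foldl max 0 = 0 := by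
  intro t
  induction t with
  | nil => intro _; rfl
  | cons a t ih =>
    intro h
    simp only [List.foldl]
    rw [max_eq_left (h a (by simp))]
    exact ih (fun x hx => h x (by simp [hx]))

-- ---- A equals the sorted greedy outside D ----
lemma snow_eq_sortedGreedy (S : List Int) (hnD : ¬ D_snow S) : snow S = sortedGreedy S := by
  by_cases hS0 : S.length = 0
  · have : S = [] := List.eq_nil_of_length_eq_zero hS0
    rw [this]; decide
  · have hlen : 1 ≤ S.length := by omega
    have hmv0 : 0 ≤ S.tail.foldl max 0 := (PySem.List.le_foldl_max S.tail 0).1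
    have hmvtail : ∀ x ∈ S.tail, x ≤ S.tail.foldl max 0 := (PySem.List.le_foldl_max S.tail 0).2
    set mv := S.tail.foldl max 0 with hmvdef
    have hsnow : snow S = scanA (heapSortA S mv) S.length 0 0 := by
      unfold snow; rw [snow_mv]
    have h0stop : 0 ≤ (if mv < (S.length:Int) then (S.length:Int) - mv - 1 else 0) ∧
        (if mv < (S.length:Int) then (S.length:Int) - mv - 1 else 0) ≤ (S.length:Int) - 1 := by
      split_ifs <;> omega
    set sN := (if mv < (S.length:Int) then (S.length:Int) - mv - 1 else 0).toNat with hsndef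
    have hsncast : (sN : Int) = if mv < (S.length:Int) then (S.length:Int) - mv - 1 else 0 := by
      rw [hsndef]; exact Int.toNat_of_nonneg h0stop.1
    obtain ⟨Tlen, Tperm, Tpair, Tcross⟩ := heapSortA_spec S mv sN hmv0 hlen hsncast
    have hTsum : snow S = sumLoopB ((heapSortA S mv).reverse) 0 0 := by
      rw [hsnow, show S.length = (heapSortA S mv).length from Tlen.symm,
        scanA_eq_sumLoopB _ _ (le_refl _), List.take_length]
    have hPQ : (heapSortA S mv).take (sN+1) ++ (heapSortA S mv).drop (sN+1) = heapSortA S mv :=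
      List.take_append_drop _ _
    have hTrev : (heapSortA S mv).reverse
        = ((heapSortA S mv).drop (sN+1)).reverse ++ ((heapSortA S mv).take (sN+1)).reverse := by
      conv_lhs => rw [← hPQ]
      rw [List.reverse_append]
    have hw : PySem.List.sorted S (fun x => x) true
        = ((heapSortA S mv).drop (sN+1)).reverse
          ++ PySem.List.sorted ((heapSortA S mv).take (sN+1)) (fun x => x) true :=
      wsort_split S _ _ (by rw [hPQ]; exact Tperm) Tpair Tcross
    rw [hTsum, hTrev]
    unfold sortedGreedy
    rw [hw]
    have hsnlen : sN ≤ S.length - 1 := by omega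
    have hPlen : ((heapSortA S mv).take (sN+1)).length = sN+1 := by
      rw [List.length_take, Tlen]; omega
    by_cases hP1 : sN = 0
    · obtain ⟨x, hx⟩ := List.length_eq_one_iff.mp (by rw [hPlen, hP1] : ((heapSortA S mv).take (sN+1)).length = 1)
      rw [hx]
      have hsx : PySem.List.sorted [x] (fun x : Int => x) true = [x] :=
        List.perm_singleton.mp (PySem.List.sorted_perm [x] (fun x : Int => x) true)
      rw [hsx, List.reverse_singleton]
    · have hsn1 : 1 ≤ sN := by omega
      have hmvn : mv < (S.length:Int) := by
        by_contra hge
        rw [if_neg hge] at hsncast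
        omega
      rw [if_pos hmvn] at hsncast
      have hQlen : (((heapSortA S mv).drop (sN+1)).length : Int) = mv := by
        rw [List.length_drop, Tlen]
        push_cast
        omega
      have hSne : S ≠ [] := by intro h; rw [h] at hlen; simp at hlen
      have hhead : S.headI :: S.tail = S := by
        cases S with
        | nil => exact absurd rfl hSne
        | cons a t => rfl
      have htail0 : S.tail.countP (fun x => decide (mv < x)) = 0 :=
        List.countP_eq_zero.mpr (fun x hx => by
          have := hmvtail x hx
          simp only [decide_eq_true_eq]
          omega)
      have hcountS : S.countP (fun x => decide (mv < x)) ≤ 1 := by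
        rw [← hhead, List.countP_cons, htail0]
        split_ifs <;> omega
      have hCP : ∀ x ∈ (heapSortA S mv).take (sN+1), x ≤ mv := by
        intro x hxP
        by_contra hgt
        push_neg at hgt
        have hxT : x ∈ heapSortA S mv := by
          rw [← hPQ]; exact List.mem_append_left _ hxP
        have hcT : (heapSortA S mv).countP (fun x => decide (mv < x))
            = S.countP (fun x => decide (mv < x)) := Tperm.countP_eq _
        have hsplit : (heapSortA S mv).countP (fun x => decide (mv < x))
            = ((heapSortA S mv).take (sN+1)).countP (fun x => decide (mv < x))
              + ((heapSortA S mv).drop (sN+1)).countP (fun x => decide (mv < x)) := by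
          rw [← hPQ, List.countP_append]
          rw [hPQ]
        have hPpos : 1 ≤ ((heapSortA S mv).take (sN+1)).countP (fun x => decide (mv < x)) := by
          by_contra h0
          have h0' : ((heapSortA S mv).take (sN+1)).countP (fun x => decide (mv < x)) = 0 := by omega
          have := List.countP_eq_zero.mp h0' x hxP
          simp only [decide_eq_true_eq] at this
          exact this hgt
        by_cases hmveq : mv = 0
        · apply hnD
          refine ⟨?_, ?_, fun x hx => by have := hmvtail x hx; omega⟩
          · have : sN + 1 ≤ S.length := by omega
            omega
          · have hxS : x ∈ S := Tperm.mem_iff.mp hxT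
            have h1le : 1 ≤ S.countP (fun x => decide (mv < x)) := by
              by_contra h0
              have h0' : S.countP (fun x => decide (mv < x)) = 0 := by omega
              have := List.countP_eq_zero.mp h0' x hxS
              simp only [decide_eq_true_eq] at this
              exact this hgt
            have hph : (fun x => decide (mv < x)) S.headI = true := by
              by_contra hph
              have : S.countP (fun x => decide (mv < x)) = 0 := by
                rw [← hhead, List.countP_cons, htail0]
                simp only [Bool.not_eq_true] at hph
                rw [hph]
                simp
              omega
            simp only [decide_eq_true_eq] at hph
            omega
        · have hQne : ((heapSortA S mv).drop (sN+1)) ≠ [] := by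
            intro h
            rw [h] at hQlen
            simp at hQlen
            omega
          obtain ⟨y, hy⟩ := List.exists_mem_of_ne_nil _ hQne
          have hxy : x ≤ y := Tcross x hxP y hy
          have hQpos : 1 ≤ ((heapSortA S mv).drop (sN+1)).countP (fun x => decide (mv < x)) := by
            by_contra h0
            have h0' : ((heapSortA S mv).drop (sN+1)).countP (fun x => decide (mv < x)) = 0 := by omega
            have := List.countP_eq_zero.mp h0' y hy
            simp only [decide_eq_true_eq] at this
            omega
          omega
      apply sumLoopB_congr
      · rw [List.length_reverse, PySem.List.length_sorted]
      · intro x hx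
        rw [List.mem_reverse] at hx
        have h1 := hCP x hx
        rw [List.length_reverse, hQlen]
        omega
      · intro x hx
        have hxP : x ∈ (heapSortA S mv).take (sN+1) :=
          (PySem.List.mem_sorted _ (fun x => x) true x).mp hx
        have h1 := hCP x hxP
        rw [List.length_reverse, hQlen]
        omega

-- ---- behaviour inside D: A returns 0, the sorted greedy returns the head ----
lemma headI_cons_tail {S : List Int} (h : S ≠ []) : S.headI :: S.tail = S := by
  cases S with
  | nil => exact absurd rfl h
  | cons a t => rfl

lemma countP_pos_eq_one (S : List Int) (hD : D_snow S) :
    S.countP (fun x => decide (0 < x)) = 1 := by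
  obtain ⟨hlen2, hpos, htail⟩ := hD
  have hSne : S ≠ [] := by intro h; rw [h] at hlen2; simp at hlen2
  rw [← headI_cons_tail hSne, List.countP_cons,
    List.countP_eq_zero.mpr (fun x hx => by
      simp only [decide_eq_true_eq]
      have := htail x hx
      omega)]
  simp [hpos]

lemma snow_in_D (S : List Int) (hD : D_snow S) : snow S = 0 := by
  obtain ⟨hlen2, hpos, htail⟩ := hD
  have hSne : S ≠ [] := by intro h; rw [h] at hlen2; simp at hlen2
  have hmveq : S.tail.foldl max 0 = 0 := foldl_max_nonpos S.tail htail
  have hsnow : snow S = scanA (heapSortA S 0) S.length 0 0 := by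
    unfold snow; rw [snow_mv, hmveq]
  have hT : heapSortA S 0 = buildHeapA S := by
    unfold heapSortA
    rw [if_pos (by omega : (0:Int) < (S.length:Int)),
      show (S.length:Int) - 0 - 1 = (S.length:Int) - 1 by ring,
      PySem.List.pyRange_neg_one_eq_nil (le_refl _)]
    rfl
  obtain ⟨Blen, Bperm, Bfine⟩ := buildHeapA_spec S
  have hn1 : S.length - 1 < (buildHeapA S).length := by omega
  have hdropsing : (buildHeapA S).drop (S.length-1) = [(buildHeapA S).getD (S.length-1) 0] := by
    rw [List.drop_eq_getElem_cons hn1, ← List.getD_eq_getElem _ 0 hn1]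
    have : (buildHeapA S).drop (S.length-1+1) = [] := List.drop_eq_nil_of_le (by omega)
    rw [this]
  have hmax : (buildHeapA S).getD (S.length-1) 0 ≤ (buildHeapA S).getD 0 0 :=
    rootMax (buildHeapA S) S.length (S.length-1) 0 (S.length-1) (Nat.sub_le _ _)
      (fun k' _ hk' => Bfine k' (by omega)) (pvDesc_all _) (by omega)
  have hcount1 := countP_pos_eq_one S ⟨hlen2, hpos, htail⟩
  have hlast : (buildHeapA S).getD (S.length-1) 0 ≤ 0 := by
    by_contra hpos'
    push_neg at hpos'
    have hcT : (buildHeapA S).countP (fun x => decide (0 < x)) = 1 := by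
      rw [List.Perm.countP_eq _ Bperm, hcount1]
    have h0mem : (buildHeapA S).getD 0 0 ∈ (buildHeapA S).take (S.length-1) :=
      List.mem_take_iff_getElem.mpr ⟨0, by omega, (List.getD_eq_getElem _ 0 (by omega)).symm⟩
    have htpos : 1 ≤ ((buildHeapA S).take (S.length-1)).countP (fun x => decide (0 < x)) := by
      by_contra h0
      have h0' : ((buildHeapA S).take (S.length-1)).countP (fun x => decide (0 < x)) = 0 := by omega
      have := List.countP_eq_zero.mp h0' _ h0mem
      simp only [decide_eq_true_eq] at this
      omega
    have hsplit : (buildHeapA S).countP (fun x => decide (0 < x)) =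
        ((buildHeapA S).take (S.length-1)).countP (fun x => decide (0 < x))
          + ((buildHeapA S).drop (S.length-1)).countP (fun x => decide (0 < x)) := by
      conv_lhs => rw [← List.take_append_drop (S.length-1) (buildHeapA S)]
      rw [List.countP_append]
    have hd1 : ((buildHeapA S).drop (S.length-1)).countP (fun x => decide (0 < x)) = 1 := by
      rw [hdropsing, List.countP_cons, List.countP_nil,
        show decide (0 < (buildHeapA S).getD (S.length-1) 0) = true from by
          simp only [decide_eq_true_eq]; exact hpos']
      rfl
    omega
  have hrev : (buildHeapA S).reverse
      = (buildHeapA S).getD (S.length-1) 0 :: ((buildHeapA S).take (S.length-1)).reverse := by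
    conv_lhs => rw [← List.take_append_drop (S.length-1) (buildHeapA S)]
    rw [List.reverse_append, hdropsing]
    rfl
  rw [hsnow, hT, show S.length = (buildHeapA S).length from Blen.symm,
    scanA_eq_sumLoopB _ _ (le_refl _), List.take_length, hrev]
  simp only [sumLoopB]
  rw [if_pos hlast]

lemma sortedGreedy_in_D (S : List Int) (hD : D_snow S) : sortedGreedy S = S.headI := by
  obtain ⟨hlen2, hpos, htail⟩ := hD
  have hSne : S ≠ [] := by intro h; rw [h] at hlen2; simp at hlen2
  cases hw : PySem.List.sorted S (fun x => x) true with
  | nil =>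
    exfalso
    have hp := PySem.List.sorted_perm S (fun x : Int => x) true
    rw [hw] at hp
    exact hSne (List.perm_nil.mp hp.symm)
  | cons m t' =>
    have hmax := PySem.List.key_head_sorted_rev_ge S (fun x => x) hw
    have hmS : m ∈ S := by
      have hm' : m ∈ PySem.List.sorted S (fun x => x) true := by
        rw [hw]; exact List.mem_cons_self
      exact (PySem.List.mem_sorted S (fun x => x) true m).mp hm'
    have hm : m = S.headI := by
      have h1 : S.headI ≤ m := hmax S.headI (by
        conv_lhs => rw [← headI_cons_tail hSne]
        exact List.mem_cons_self)
      rcases List.mem_cons.mp (by rw [← headI_cons_tail hSne] at hmS; exact hmS) with h | h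
      · exact h
      · have := htail m h; omega
    have hperm : (m :: t').Perm S := by
      rw [← hw]; exact PySem.List.sorted_perm S (fun x => x) true
    have hcount1 := countP_pos_eq_one S ⟨hlen2, hpos, htail⟩
    have ht'0 : ∀ x ∈ t', x ≤ 0 := by
      have hc : (m :: t').countP (fun x => decide (0 < x)) = 1 := by
        rw [List.Perm.countP_eq _ hperm]; exact hcount1
      have hm'' : decide (0 < m) = true := by
        simp only [decide_eq_true_eq]; omega
      intro x hx
      by_contra hxpos
      push_neg at hxpos
      have hx1 : 1 ≤ t'.countP (fun x : Int => decide (0 < x)) := by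
        by_contra h0
        have h0' : t'.countP (fun x : Int => decide (0 < x)) = 0 := by omega
        have := List.countP_eq_zero.mp h0' x hx
        simp only [decide_eq_true_eq] at this
        omega
      have h2 : 2 ≤ (m :: t').countP (fun x : Int => decide (0 < x)) := by
        rw [List.countP_cons, hm'', if_pos rfl]
        omega
      omega
    unfold sortedGreedy
    rw [hw]
    simp only [sumLoopB]
    rw [if_neg (by omega : ¬ m ≤ (0:Int))]
    cases t' with
    | nil => simp only [sumLoopB]; omega
    | cons z zs =>
      simp only [sumLoopB]
      rw [if_pos (by have := ht'0 z (by simp); omega : z ≤ (0:Int) + 1)]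
      omega

-- ===== B equals the sorted greedy (the counting identity) =====

-- c(t): the number of elements of l that are ≥ t
def pvC (l : List Int) (t : Int) : Int := (l.countP (fun x => decide (t ≤ x)) : Int)

lemma pvC_nil (t : Int) : pvC [] t = 0 := rfl

lemma pvC_cons (x : Int) (l : List Int) (t : Int) :
    pvC (x :: l) t = pvC l t + (if t ≤ x then 1 else 0) := by
  unfold pvC
  rw [List.countP_cons]
  by_cases h : t ≤ x <;> simp [h]

lemma pvC_nonneg (l : List Int) (t : Int) : 0 ≤ pvC l t := Int.natCast_nonneg _

lemma pvC_le_length (l : List Int) (t : Int) : pvC l t ≤ (l.length : Int) := by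
  unfold pvC
  exact_mod_cast List.countP_le_length

lemma pvC_zero_of_gt (l : List Int) (v t : Int) (hall : ∀ x ∈ l, x ≤ v) (h : v < t) :
    pvC l t = 0 := by
  unfold pvC
  rw [List.countP_eq_zero.mpr (fun x hx => by
    simp only [decide_eq_true_eq]
    have := hall x hx
    omega)]
  rfl

lemma pvC_succ (l : List Int) (t : Int) :
    pvC l t = pvC l (t+1) + (l.countP (fun x => decide (x = t)) : Int) := by
  induction l with
  | nil => rfl
  | cons a w ih =>
    rw [pvC_cons, pvC_cons, List.countP_cons, ih]
    simp only [decide_eq_true_eq]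
    push_cast
    split_ifs <;> omega

-- the early-exit greedy over a descending list equals the threshold sum Σ min((t-d)⁺, c(t))
lemma sumLoopB_eq_sum (M : Int) :
    ∀ (L : List Int), List.Pairwise (fun a b : Int => b ≤ a) L → (∀ x ∈ L, x ≤ M) →
    ∀ (d acc : Int), 0 ≤ d →
    sumLoopB L d acc
      = acc + ∑ t ∈ Finset.Ico (1:ℤ) (M+1), min (max (t - d) 0) (pvC L t) := by
  intro L
  induction L with
  | nil =>
    intro _ _ d acc _
    simp [sumLoopB, pvC_nil]
  | cons v w ih =>
    intro hpw hle d acc hd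
    have hwv : ∀ x ∈ w, x ≤ v := (List.pairwise_cons.mp hpw).1
    have hpw' := (List.pairwise_cons.mp hpw).2
    simp only [sumLoopB]
    by_cases hv : v ≤ d
    · rw [if_pos hv]
      have hzero : ∀ t ∈ Finset.Ico (1:ℤ) (M+1), min (max (t-d) 0) (pvC (v::w) t) = 0 := by
        intro t ht
        by_cases htd : t ≤ d
        · have h1 : max (t-d) 0 = 0 := by omega
          have h2 := pvC_nonneg (v::w) t
          rw [h1]
          omega
        · have hz : pvC (v::w) t = 0 :=
            pvC_zero_of_gt _ v t (by
              intro x hx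
              rcases List.mem_cons.mp hx with rfl | hx'
              · exact le_refl _
              · exact hwv x hx') (by omega)
          rw [hz]
          have : (0:ℤ) ≤ max (t-d) 0 := le_max_right _ _
          omega
      rw [Finset.sum_congr rfl hzero]
      simp
    · rw [if_neg hv]
      push_neg at hv
      rw [ih hpw' (fun x hx => hle x (List.mem_cons_of_mem _ hx)) (d+1) _ (by omega)]
      have hvm : v ≤ M := hle v List.mem_cons_self
      have key : ∀ t ∈ Finset.Ico (1:ℤ) (M+1),
          min (max (t-d) 0) (pvC (v::w) t)
            = min (max (t-(d+1)) 0) (pvC w t) + (if d+1 ≤ t ∧ t ≤ v then 1 else 0) := by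
        intro t ht
        simp only [Finset.mem_Ico] at ht
        rw [pvC_cons]
        by_cases htv : t ≤ v
        · have h0 := pvC_nonneg w t
          split_ifs <;> omega
        · have hz : pvC w t = 0 := pvC_zero_of_gt w v t hwv (by omega)
          rw [hz]
          split_ifs <;> omega
      rw [Finset.sum_congr rfl key, Finset.sum_add_distrib]
      have hcard : (∑ t ∈ Finset.Ico (1:ℤ) (M+1), (if d+1 ≤ t ∧ t ≤ v then (1:ℤ) else 0))
          = v - d := by
        rw [Finset.sum_boole]
        have hfil : (Finset.Ico (1:ℤ) (M+1)).filter (fun t => d+1 ≤ t ∧ t ≤ v)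
            = Finset.Icc (d+1) v := by
          ext t
          simp only [Finset.mem_filter, Finset.mem_Ico, Finset.mem_Icc]
          omega
        rw [hfil, Int.card_Icc]
        omega
      rw [hcard]
      omega

-- helper: split off the top element of an integer Ico sum
lemma sum_Ico_top (f : ℤ → ℤ) (b : ℤ) (h : 1 ≤ b) :
    ∑ t ∈ Finset.Ico (1:ℤ) (b+1), f t = (∑ t ∈ Finset.Ico (1:ℤ) b, f t) + f b := by
  have hs : Finset.Ico b (b+1) = {b} := by
    ext t; simp only [Finset.mem_Ico, Finset.mem_singleton]; omega
  rw [← Finset.Ico_union_Ico_eq_Ico h (by omega : b ≤ b+1),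
    Finset.sum_union (by
      simp only [Finset.disjoint_left, Finset.mem_Ico]
      intro a ha hb2; omega), hs, Finset.sum_singleton]

-- helper: glue two consecutive integer Ico sums
lemma sum_Ico_glue (f : ℤ → ℤ) (n M : ℤ) (h1 : 1 ≤ n) (h2 : n ≤ M+1) :
    (∑ t ∈ Finset.Ico (1:ℤ) n, f t) + (∑ t ∈ Finset.Ico n (M+1), f t)
      = ∑ t ∈ Finset.Ico (1:ℤ) (M+1), f t := by
  rw [← Finset.Ico_union_Ico_eq_Ico h1 h2,
    Finset.sum_union (by
      simp only [Finset.disjoint_left, Finset.mem_Ico]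
      intro a ha hb2; omega)]

-- ---- the first loop of B ----
lemma loop1_spec (n : Int) :
    ∀ (l : List Int) (bk : List Int) (tot c : Int), n ≤ (bk.length : Int) →
    (l.foldl (snowAltStep n) (bk, tot, c)).1.length = bk.length ∧
    (∀ v : Nat, 1 ≤ (v:Int) → (v:Int) < n →
      (l.foldl (snowAltStep n) (bk, tot, c)).1.getD v 0
        = bk.getD v 0 + (l.countP (fun x => decide (x = (v:Int))) : Int)) ∧
    (l.foldl (snowAltStep n) (bk, tot, c)).2.1
      = tot + (l.map (fun x => if n ≤ x then x - n + 1 else 0)).sum ∧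
    (l.foldl (snowAltStep n) (bk, tot, c)).2.2
      = c + (l.countP (fun x => decide (n ≤ x)) : Int) := by
  intro l
  induction l with
  | nil =>
    intro bk tot c _
    refine ⟨rfl, fun v _ _ => by simp, by simp, by simp⟩
  | cons x w ih =>
    intro bk tot c hbk
    simp only [List.foldl_cons]
    by_cases hx1 : n ≤ x
    · have hstep : snowAltStep n (bk, tot, c) x = (bk, tot + (x - n + 1), c + 1) := by
        unfold snowAltStep
        rw [if_pos hx1]
      rw [hstep]
      obtain ⟨ihl, ihb, iht, ihc⟩ := ih bk (tot + (x - n + 1)) (c + 1) hbk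
      refine ⟨ihl, ?_, ?_, ?_⟩
      · intro v hv1 hv2
        rw [ihb v hv1 hv2, List.countP_cons]
        simp only [decide_eq_true_eq]
        rw [if_neg (by omega : ¬ x = (v:Int))]
        simp
      · rw [iht, List.map_cons, List.sum_cons, if_pos hx1]
        ring
      · rw [ihc, List.countP_cons]
        simp only [decide_eq_true_eq]
        rw [if_pos hx1]
        push_cast
        ring
    · by_cases hx2 : 1 ≤ x
      · have hxl : x.toNat < bk.length := by omega
        have hstep : snowAltStep n (bk, tot, c) x
            = (bk.set x.toNat (bk.getD x.toNat 0 + 1), tot, c) := by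
          unfold snowAltStep
          rw [if_neg hx1, if_pos hx2]
        rw [hstep]
        obtain ⟨ihl, ihb, iht, ihc⟩ :=
          ih (bk.set x.toNat (bk.getD x.toNat 0 + 1)) tot c (by simpa using hbk)
        refine ⟨by rw [ihl]; simp, ?_, ?_, ?_⟩
        · intro v hv1 hv2
          rw [ihb v hv1 hv2, List.countP_cons]
          simp only [decide_eq_true_eq]
          by_cases hvx : (v:Int) = x
          · have hvn : v = x.toNat := by omega
            subst hvn
            rw [getD_set_self hxl, if_pos (by omega : x = ((x.toNat:Nat):Int))]
            push_cast
            ring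
          · rw [getD_set_ne (by omega : x.toNat ≠ v),
              if_neg (by omega : ¬ x = (v:Int))]
            simp
        · rw [iht, List.map_cons, List.sum_cons, if_neg hx1]
          ring
        · rw [ihc, List.countP_cons,
            show (decide (n ≤ x)) = false from by simpa using hx1]
          simp
      · have hstep : snowAltStep n (bk, tot, c) x = (bk, tot, c) := by
          unfold snowAltStep
          rw [if_neg hx1, if_neg hx2]
        rw [hstep]
        obtain ⟨ihl, ihb, iht, ihc⟩ := ih bk tot c hbk
        refine ⟨ihl, ?_, ?_, ?_⟩
        · intro v hv1 hv2
          rw [ihb v hv1 hv2, List.countP_cons]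
          simp only [decide_eq_true_eq]
          rw [if_neg (by omega : ¬ x = (v:Int))]
          simp
        · rw [iht, List.map_cons, List.sum_cons, if_neg hx1]
          ring
        · rw [ihc, List.countP_cons]
          simp only [decide_eq_true_eq]
          rw [if_neg hx1]
          simp

-- ---- the second loop of B ----
lemma loop2_spec (S bk : List Int) (n : Nat)
    (hb : ∀ v : Nat, 1 ≤ v → v < n →
      bk.getD v 0 = (S.countP (fun x => decide (x = (v:Int))) : Int)) :
    ∀ (k : Nat), k < n → ∀ (tot : Int),
    ((PySem.List.pyRange ((k:Nat):Int) 0 (-1)).foldl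
      (fun (p : Int × Int) t =>
        (p.1 + bk.getD t.toNat 0,
         p.2 + (if t < p.1 + bk.getD t.toNat 0 then t else p.1 + bk.getD t.toNat 0)))
      (pvC S ((k:Int)+1), tot))
    = (pvC S 1, tot + ∑ t ∈ Finset.Ico (1:ℤ) ((k:Int)+1), min t (pvC S t)) := by
  intro k
  induction k with
  | zero =>
    intro _ tot
    rw [PySem.List.pyRange_neg_one_eq_nil (by norm_num)]
    simp
  | succ k ih =>
    intro hk tot
    have hcons : PySem.List.pyRange ((k+1:Nat):Int) 0 (-1)
        = ((k+1:Nat):Int) :: PySem.List.pyRange ((k:Nat):Int) 0 (-1) := by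
      rw [PySem.List.pyRange_neg_one_cons (by push_cast; omega)]
      congr 1
      push_cast; ring
    rw [hcons]
    simp only [List.foldl_cons, Int.toNat_natCast]
    have hbk : bk.getD (k+1) 0 = (S.countP (fun x => decide (x = ((k+1:Nat):Int))) : Int) :=
      hb (k+1) (by omega) hk
    have hc : pvC S (((k+1:Nat):Int)+1) + bk.getD (k+1) 0 = pvC S ((k:Int)+1) := by
      rw [hbk]
      have := pvC_succ S ((k:Int)+1)
      push_cast at this ⊢
      rw [show (k:Int)+1+1 = (k:Int)+2 from by ring] at this ⊢
      omega
    rw [hc]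
    have hmin : (if ((k+1:Nat):Int) < pvC S ((k:Int)+1) then ((k+1:Nat):Int)
        else pvC S ((k:Int)+1)) = min (((k:Int)+1)) (pvC S ((k:Int)+1)) := by
      push_cast
      split_ifs <;> omega
    rw [hmin, ih (by omega)]
    have hsum : ∑ t ∈ Finset.Ico (1:ℤ) (((k+1:Nat):Int)+1), min t (pvC S t)
        = (∑ t ∈ Finset.Ico (1:ℤ) ((k:Int)+1), min t (pvC S t))
          + min ((k:Int)+1) (pvC S ((k:Int)+1)) := by
      rw [show (((k+1:Nat):Int)+1) = ((k:Int)+1)+1 from by push_cast; ring]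
      exact sum_Ico_top (fun t => min t (pvC S t)) ((k:Int)+1) (by omega)
    rw [hsum]
    refine congrArg (Prod.mk _) (by ring)

-- ---- the overflow term is the tail of the threshold sum ----
lemma extra_sum (n M : Int) :
    ∀ (l : List Int), (∀ x ∈ l, x ≤ M) →
    (l.map (fun x => if n ≤ x then x - n + 1 else 0)).sum
      = ∑ t ∈ Finset.Ico n (M+1), pvC l t := by
  intro l
  induction l with
  | nil => simp [pvC_nil]
  | cons x w ih =>
    intro hle
    simp only [List.map_cons, List.sum_cons]
    rw [ih (fun y hy => hle y (List.mem_cons_of_mem _ hy)),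
      Finset.sum_congr rfl (fun t _ => pvC_cons x w t), Finset.sum_add_distrib]
    have hxm : x ≤ M := hle x List.mem_cons_self
    have hind : (∑ t ∈ Finset.Ico n (M+1), (if t ≤ x then (1:ℤ) else 0))
        = if n ≤ x then x - n + 1 else 0 := by
      rw [Finset.sum_boole]
      have hfil : (Finset.Ico n (M+1)).filter (fun t => t ≤ x) = Finset.Icc n x := by
        ext t
        simp only [Finset.mem_filter, Finset.mem_Ico, Finset.mem_Icc]
        omega
      rw [hfil, Int.card_Icc]
      split_ifs <;> omega
    rw [hind]
    ring

lemma replicate_getD (n v : Nat) : (List.replicate n (0:Int)).getD v 0 = 0 := by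
  by_cases h : v < n
  · rw [List.getD_eq_getElem _ _ (by simpa using h)]
    simp
  · rw [List.getD_eq_default _ _ (by simpa using h)]

-- ---- B = sorted greedy ----
lemma snow_alt_eq_sortedGreedy (S : List Int) : snow_alt S = sortedGreedy S := by
  by_cases hS0 : S = []
  · subst hS0; decide
  · have hlen : 1 ≤ S.length := by
      cases S with
      | nil => exact absurd rfl hS0
      | cons a t => simp
    set M := S.foldl max ((S.length:Int)) with hMdef
    have hM := PySem.List.le_foldl_max S ((S.length:Int))
    have hMn : (S.length:Int) ≤ M := hM.1
    have hMel : ∀ x ∈ S, x ≤ M := hM.2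
    -- the first loop
    obtain ⟨L1l, L1b, L1t, L1c⟩ := loop1_spec ((S.length:Int)) S
      (List.replicate S.length 0) 0 0 (by simp)
    set st := S.foldl (snowAltStep ((S.length:Int))) (List.replicate S.length 0, 0, 0) with hst
    have hstb : ∀ v : Nat, 1 ≤ v → v < S.length →
        st.1.getD v 0 = (S.countP (fun x => decide (x = (v:Int))) : Int) := by
      intro v hv1 hv2
      rw [L1b v (by omega) (by exact_mod_cast hv2), replicate_getD]
      ring
    have hstc : st.2.2 = pvC S ((S.length:Int)) := by
      rw [L1c]
      unfold pvC
      ring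
    have hstt : st.2.1 = ∑ t ∈ Finset.Ico ((S.length:Int)) (M+1), pvC S t := by
      rw [L1t, extra_sum ((S.length:Int)) M S hMel]
      ring
    -- the second loop
    have hk : S.length - 1 < S.length := by omega
    have hkc : ((S.length - 1 : Nat):Int) + 1 = (S.length:Int) := by
      push_cast
      omega
    have hrange : (S.length:Int) - 1 = ((S.length - 1 : Nat):Int) := by
      push_cast
      omega
    have halt : snow_alt S
        = (pvC S 1, st.2.1 + ∑ t ∈ Finset.Ico (1:ℤ) ((S.length:Int)),
            min t (pvC S t)).2 := by
      show (((PySem.List.pyRange ((S.length:Int) - 1) 0 (-1)).foldl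
        (fun (p : Int × Int) t =>
          (p.1 + st.1.getD t.toNat 0,
           p.2 + (if t < p.1 + st.1.getD t.toNat 0 then t else p.1 + st.1.getD t.toNat 0)))
        (st.2.2, st.2.1)).2) = _
      rw [hrange, hstc, show pvC S ((S.length:Int)) = pvC S (((S.length - 1 : Nat):Int)+1) from by rw [hkc]]
      rw [loop2_spec S st.1 S.length hstb (S.length - 1) hk st.2.1, hkc]
    rw [halt]
    -- combine the two pieces of the threshold sum
    have hmintail : ∀ t ∈ Finset.Ico ((S.length:Int)) (M+1), pvC S t = min t (pvC S t) := by
      intro t ht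
      simp only [Finset.mem_Ico] at ht
      have h1 := pvC_le_length S t
      omega
    have hjoin : st.2.1 + ∑ t ∈ Finset.Ico (1:ℤ) ((S.length:Int)), min t (pvC S t)
        = ∑ t ∈ Finset.Ico (1:ℤ) (M+1), min t (pvC S t) := by
      rw [hstt, Finset.sum_congr rfl hmintail, add_comm]
      exact sum_Ico_glue (fun t => min t (pvC S t)) ((S.length:Int)) M
        (by omega) (by omega)
    rw [show ((pvC S 1, st.2.1 + ∑ t ∈ Finset.Ico (1:ℤ) ((S.length:Int)), min t (pvC S t)).2 : Int)
      = st.2.1 + ∑ t ∈ Finset.Ico (1:ℤ) ((S.length:Int)), min t (pvC S t) from rfl, hjoin]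
    -- the sorted greedy equals the same sum
    unfold sortedGreedy
    rw [sumLoopB_eq_sum M (PySem.List.sorted S (fun x => x) true)
      (PySem.List.sorted_pairwise_rev S (fun x => x))
      (fun x hx => hMel x ((PySem.List.mem_sorted S (fun x => x) true x).mp hx))
      0 0 (le_refl 0)]
    have hcongr : ∀ t ∈ Finset.Ico (1:ℤ) (M+1),
        min (max (t - 0) 0) (pvC (PySem.List.sorted S (fun x => x) true) t)
          = min t (pvC S t) := by
      intro t ht
      simp only [Finset.mem_Ico] at ht
      have hperm : pvC (PySem.List.sorted S (fun x => x) true) t = pvC S t := by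
        unfold pvC
        rw [List.Perm.countP_eq _ (PySem.List.sorted_perm S (fun x => x) true)]
      rw [hperm]
      have : max (t - 0) 0 = t := by omega
      rw [this]
    rw [Finset.sum_congr rfl hcongr]
    ring

-- ===== VERDICT (by name: the statement is the Claim_ definition above) =====
theorem snow_spec : Claim_unchanged_snow := by
  unfold Claim_unchanged_snow Spec_snow
  intro S _ hnD
  rw [snow_eq_sortedGreedy S hnD, snow_alt_eq_sortedGreedy]
theorem snow_changed : Claim_changed_snow := by unfold Claim_changed_snow; decide
theorem snow_tight : Claim_exact_snow := by
  unfold Claim_exact_snow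
  intro S _ hD
  rw [snow_in_D S hD, snow_alt_eq_sortedGreedy, sortedGreedy_in_D S hD]
  obtain ⟨_, hpos, _⟩ := hD
  omega
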